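-- pv_equiv track=rewrite | github.com/bsmith89/compbio-template | scripts/parse_make_db.py | database_recipes
-- ===== SOURCE A (Python) =====
-- def database_recipes(lines):
--     """Remove everything before explicit recipes in Makefile database."""
--     before = True
--     for line in lines:
--         if before:
--             if line.strip() == "# Files":
--                 before = False
--         else:
--             yield line
-- ===== SOURCE B (Python) =====
-- def database_recipes(lines):
--     """Remove everything before explicit recipes in Makefile database."""
--     lines = list(lines)
--     try:
--         i = [l.strip() for l in lines].index("# Files")
--     except ValueError:
--         return
--     yield from lines[i + 1:]
-- ===== Notes on version B (the rewrite author's own statement) =====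
-- stated objective: alternative
-- what changed: Replaces the flag-driven generator loop with staged passes: materialize the lines, locate the marker's position with list.index on the stripped copy, and return a slice lines[i+1:] (empty iterator if the marker is absent).
import Mathlib
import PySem

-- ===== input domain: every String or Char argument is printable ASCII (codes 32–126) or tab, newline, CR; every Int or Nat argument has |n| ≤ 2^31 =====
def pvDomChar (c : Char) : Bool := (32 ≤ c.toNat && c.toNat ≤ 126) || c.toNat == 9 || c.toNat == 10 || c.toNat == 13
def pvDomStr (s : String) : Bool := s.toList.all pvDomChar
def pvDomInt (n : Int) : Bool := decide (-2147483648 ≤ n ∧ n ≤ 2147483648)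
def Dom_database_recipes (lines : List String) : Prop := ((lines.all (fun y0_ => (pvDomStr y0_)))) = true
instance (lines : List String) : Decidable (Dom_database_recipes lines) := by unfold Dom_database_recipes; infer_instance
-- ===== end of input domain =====

-- B replaces A's flag-driven single-pass loop with staged passes: find the marker's index in the stripped copy, then slice past it (alternative decomposition; return-value equivalence, B materializes the iterator).

-- ===== PORT A =====
-- A's single pass with a 'before' flag: if before, flip on the marker; else emit the line.
def database_recipes_go (before : Bool) : List String → List String
  | [] => []
  | line :: rest =>
    if before then
      database_recipes_go (if PySem.Str.strip line = "# Files" then false else true) rest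
    else
      line :: database_recipes_go false rest

def database_recipes (lines : List String) : List String :=
  database_recipes_go true lines

-- ===== PORT B =====
-- B: i = [l.strip() for l in lines].index("# Files"), then lines[i+1:]; empty if ValueError.
def database_recipes_alt (lines : List String) : List String :=
  match PySem.List.index? (lines.map PySem.Str.strip) "# Files" with
  | none => []
  | some i => PySem.List.slice lines (some ((i : Int) + 1)) none

-- ===== PRECONDITION & SPEC =====
def Spec_database_recipes (lines : List String) (out : List String) : Prop := out = database_recipes_alt lines
instance (lines : List String) (out : List String) : Decidable (Spec_database_recipes lines out) := by unfold Spec_database_recipes; infer_instance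

-- ===== CLAIM =====
def Claim_equal_database_recipes : Prop := ∀ (lines : List String), Dom_database_recipes lines → Spec_database_recipes lines (database_recipes lines)

-- ===== LEMMAS AND PROOFS =====
theorem database_recipes_go_false (lines : List String) :
    database_recipes_go false lines = lines := by
  induction lines with
  | nil => rfl
  | cons l rest ih => simp [database_recipes_go, ih]

theorem database_recipes_go_true (lines : List String) :
    database_recipes_go true lines = database_recipes_alt lines := by
  induction lines with
  | nil => rfl
  | cons l rest ih =>
    by_cases h : PySem.Str.strip l = "# Files"
    · rw [database_recipes_alt, List.map_cons, h, PySem.List.index?_cons_self]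
      simp only [database_recipes_go, h, if_true]
      rw [show ((0 : Nat) : Int) + 1 = ((1 : Nat) : Int) by norm_num,
        PySem.List.slice_from_natCast, List.drop_one, List.tail_cons,
        database_recipes_go_false]
    · rw [database_recipes_alt, List.map_cons, PySem.List.index?_cons_of_ne _ h]
      simp only [database_recipes_go, h, if_false, if_true]
      rw [ih, database_recipes_alt]
      cases hidx : PySem.List.index? (rest.map PySem.Str.strip) "# Files" with
      | none => simp
      | some i =>
        simp only [Option.map_some]
        rw [show (((i + 1 : Nat) : Int) + 1) = (((i + 2 : Nat)) : Int) by push_cast; ring,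
          PySem.List.slice_from_natCast,
          show ((i : Int) + 1) = (((i + 1 : Nat)) : Int) by push_cast; ring,
          PySem.List.slice_from_natCast]
        rfl

-- ===== VERDICT =====
theorem database_recipes_spec : Claim_equal_database_recipes := by
  intro lines _
  exact database_recipes_go_true lines
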